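-- pv_equiv track=rewrite | github.com/MrBrantCode/unitest_baseline | mut_generate/mist_train_taco/taco_3598/solution.py | max_square_area_and_count
-- ===== SOURCE A (Python) =====
-- def max_square_area_and_count(arr, n):
--     from collections import defaultdict
--
--     # Dictionary to count occurrences of each stick length
--     stick_count = defaultdict(int)
--
--     # Dictionary to count how many squares can be formed for each area
--     area_count = defaultdict(int)
--
--     # Result variables
--     max_area = 0
--     count = 0
--
--     for length in arr:
--         stick_count[length] += 1
--         if stick_count[length] % 4 == 0:
--             area = length * length
--             area_count[area] += 1
--             if area > max_area:
--                 max_area = area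
--                 count = area_count[area]
--             elif area == max_area:
--                 count = area_count[area]
--
--     # If no square can be formed
--     if max_area == 0:
--         return (-1, 0)
--
--     return (max_area, count)
-- ===== SOURCE B (Python) =====
-- def max_square_area_and_count(arr, n):
--     from collections import Counter
--     freq = Counter(arr)
--     area_squares = {}
--     for length, c in freq.items():
--         k = c // 4
--         if k:
--             area = length * length
--             area_squares[area] = area_squares.get(area, 0) + k
--     best = max((a for a in area_squares if a > 0), default=None)
--     if best is None:
--         return (-1, 0)
--     return (best, area_squares[best])
-- ===== Notes on version B (the rewrite author's own statement) =====
-- stated objective: simpler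
-- what changed: A makes one streaming pass that interleaves two dicts with a running maximum and count; B first builds a full frequency map, then aggregates square counts by area (count // 4 per distinct length) in a second pass, and finally takes one max reduction over the positive areas.
import Mathlib
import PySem

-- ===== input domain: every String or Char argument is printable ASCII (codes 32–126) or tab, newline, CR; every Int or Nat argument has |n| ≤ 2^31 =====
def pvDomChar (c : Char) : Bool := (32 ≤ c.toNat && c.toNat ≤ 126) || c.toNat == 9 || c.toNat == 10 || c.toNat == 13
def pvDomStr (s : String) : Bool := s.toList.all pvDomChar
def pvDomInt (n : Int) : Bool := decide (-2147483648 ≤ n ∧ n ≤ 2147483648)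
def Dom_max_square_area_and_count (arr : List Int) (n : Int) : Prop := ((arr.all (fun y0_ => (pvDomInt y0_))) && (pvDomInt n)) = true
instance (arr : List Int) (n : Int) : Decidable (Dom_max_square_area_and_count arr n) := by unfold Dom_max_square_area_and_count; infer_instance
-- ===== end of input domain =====

-- ===== PORT A =====
-- B re-implements A by a different decomposition: a frequency map built first, square counts
-- aggregated by area in a second pass, then one max reduction (objective: simpler; not faster).

structure StA where
  sc : PySem.Dict Int Int
  ac : PySem.Dict Int Int
  maxA : Int
  cnt : Int
deriving Repr, DecidableEq

def stepA (st : StA) (length : Int) : StA :=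
  let sc := st.sc.modify length 0 (· + 1)
  if PySem.Int.mod (sc.getD length 0) 4 = 0 then
    let area := length * length
    let ac := st.ac.modify area 0 (· + 1)
    if st.maxA < area then { sc := sc, ac := ac, maxA := area, cnt := ac.getD area 0 }
    else if area = st.maxA then { sc := sc, ac := ac, maxA := st.maxA, cnt := ac.getD area 0 }
    else { st with sc := sc, ac := ac }
  else { st with sc := sc }

def max_square_area_and_count (arr : List Int) (_n : Int) : Int × Int :=
  let st := arr.foldl stepA ⟨PySem.Dict.empty, PySem.Dict.empty, 0, 0⟩
  if st.maxA = 0 then (-1, 0) else (st.maxA, st.cnt)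

-- ===== PORT B =====
def stepB (asq : PySem.Dict Int Int) (p : Int × Int) : PySem.Dict Int Int :=
  let k := PySem.Int.floordiv p.2 4
  if k ≠ 0 then
    let area := p.1 * p.1
    asq.insert area (asq.getD area 0 + k)
  else asq

def max_square_area_and_count_alt (arr : List Int) (_n : Int) : Int × Int :=
  let freq := PySem.Dict.counter arr
  let asq := freq.items.foldl stepB PySem.Dict.empty
  match PySem.List.max? (asq.keys.filter (fun a => decide (0 < a))) (fun a => a) with
  | none => (-1, 0)
  | some best => (best, asq.getD best 0)

-- ===== PRECONDITION & SPEC =====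
def Spec_max_square_area_and_count (arr : List Int) (n : Int) (out : Int × Int) : Prop := out = max_square_area_and_count_alt arr n
instance (arr : List Int) (n : Int) (out : Int × Int) : Decidable (Spec_max_square_area_and_count arr n out) := by unfold Spec_max_square_area_and_count; infer_instance

-- ===== CLAIM (what is proved, stated in full; the proofs are below) =====
def Claim_equal_max_square_area_and_count : Prop := ∀ (arr : List Int) (n : Int), Dom_max_square_area_and_count arr n → Spec_max_square_area_and_count arr n (max_square_area_and_count arr n)

-- ===== LEMMAS AND PROOFS =====

-- number of squares of area `a` formable from sticks `xs` (sum over distinct lengths of count // 4)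
def Fcnt (xs : List Int) (a : Int) : Nat :=
  (((PySem.Set.ofList xs).filter (fun l => decide (l * l = a))).map (fun l => xs.count l / 4)).sum

lemma sum_bump (s : List Int) (f g : Int → Nat) (x : Int) (d : Nat)
    (hnd : s.Nodup) (hx : x ∈ s) (hfg : ∀ l ∈ s, l ≠ x → f l = g l) (hxd : f x = g x + d) :
    (s.map f).sum = (s.map g).sum + d := by
  induction s with
  | nil => cases hx
  | cons y t ih =>
    obtain ⟨hyt, hndt⟩ := List.nodup_cons.mp hnd
    simp only [List.map_cons, List.sum_cons]
    rcases List.mem_cons.mp hx with rfl | hxt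
    · have hmap : t.map f = t.map g := List.map_congr_left (fun l hl =>
        hfg l (List.mem_cons_of_mem _ hl) (by rintro rfl; exact hyt hl))
      rw [hmap, hxd]; omega
    · have hyx : y ≠ x := by rintro rfl; exact hyt hxt
      rw [hfg y (List.mem_cons_self) hyx,
        ih hndt hxt (fun l hl hlx => hfg l (List.mem_cons_of_mem _ hl) hlx)]
      omega

lemma count_append_single (p : List Int) (x l : Int) :
    (p ++ [x]).count l = p.count l + (if l = x then 1 else 0) := by
  rw [List.count_append]
  have : List.count l [x] = if l = x then 1 else 0 := by
    simp [List.count_singleton']; split <;> simp_all [eq_comm]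
  rw [this]


lemma Fcnt_append (p : List Int) (x a : Int) :
    Fcnt (p ++ [x]) a = Fcnt p a + (if x * x = a ∧ (p.count x + 1) % 4 = 0 then 1 else 0) := by
  unfold Fcnt
  rw [PySem.Set.ofList_append_singleton]
  by_cases hmem : x ∈ p
  · rw [PySem.Set.add_of_mem ((PySem.Set.mem_ofList _ _).mpr hmem)]
    by_cases hP : x * x = a
    · have hxf : x ∈ (PySem.Set.ofList p).filter (fun l => decide (l * l = a)) := by
        simp [List.mem_filter, PySem.Set.mem_ofList, hmem, hP]
      have := sum_bump ((PySem.Set.ofList p).filter (fun l => decide (l * l = a)))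
        (fun l => (p ++ [x]).count l / 4) (fun l => p.count l / 4) x
        (if (p.count x + 1) % 4 = 0 then 1 else 0)
        ((PySem.Set.nodup_ofList p).filter _) hxf
        (fun l _ hlx => by
          show List.count l (p ++ [x]) / 4 = List.count l p / 4
          rw [count_append_single]; simp [hlx])
        (by
          show List.count x (p ++ [x]) / 4 = List.count x p / 4 + _
          rw [count_append_single]; simp; split <;> omega)
      rw [this]; simp [hP]
    · have : ∀ l ∈ (PySem.Set.ofList p).filter (fun l => decide (l * l = a)),
          (p ++ [x]).count l / 4 = p.count l / 4 := by
        intro l hl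
        have hla : l * l = a := by simpa using (List.mem_filter.mp hl).2
        have : l ≠ x := by rintro rfl; exact hP hla
        rw [count_append_single]; simp [this]
      rw [List.map_congr_left this, if_neg (by tauto)]; simp
  · rw [PySem.Set.add_of_not_mem (by simpa [PySem.Set.mem_ofList] using hmem)]
    have hc0 : p.count x = 0 := List.count_eq_zero.mpr hmem
    have hrest : ∀ l ∈ (PySem.Set.ofList p).filter (fun l => decide (l * l = a)),
        (p ++ [x]).count l / 4 = p.count l / 4 := by
      intro l hl
      have : l ∈ p := (PySem.Set.mem_ofList _ _).mp (List.mem_filter.mp hl).1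
      have hlx : l ≠ x := by rintro rfl; exact hmem this
      rw [count_append_single]; simp [hlx]
    rw [List.filter_append, List.map_append, List.sum_append, List.map_congr_left hrest]
    by_cases hP : x * x = a
    · simp [hP, List.count_append, hc0]
    · simp [hP]

lemma Fcnt_nil (a : Int) : Fcnt [] a = 0 := rfl

lemma Fcnt_pos_iff (xs : List Int) (a : Int) :
    1 ≤ Fcnt xs a ↔ ∃ l ∈ xs, l * l = a ∧ 1 ≤ xs.count l / 4 := by
  unfold Fcnt
  rw [Nat.one_le_iff_ne_zero, Ne, List.sum_eq_zero_iff]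
  simp only [not_forall, exists_prop]
  constructor
  · rintro ⟨y, hy, hy0⟩
    obtain ⟨l, hl, rfl⟩ := List.mem_map.mp hy
    obtain ⟨hls, hla⟩ := List.mem_filter.mp hl
    exact ⟨l, (PySem.Set.mem_ofList _ _).mp hls, by simpa using hla, by omega⟩
  · rintro ⟨l, hl, hla, h4⟩
    exact ⟨xs.count l / 4, List.mem_map.mpr ⟨l, List.mem_filter.mpr
      ⟨(PySem.Set.mem_ofList _ _).mpr hl, by simpa using hla⟩, rfl⟩, by omega⟩



def InvA (p : List Int) (st : StA) : Prop :=
  (∀ l, st.sc.getD l 0 = (p.count l : Int)) ∧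
  (∀ a, st.ac.getD a 0 = (Fcnt p a : Int)) ∧
  (st.maxA = 0 ∨ (0 < st.maxA ∧ 1 ≤ Fcnt p st.maxA)) ∧
  (∀ a, 0 < a → 1 ≤ Fcnt p a → a ≤ st.maxA) ∧
  st.cnt = (Fcnt p st.maxA : Int)

lemma invA_step (p : List Int) (st : StA) (x : Int) (h : InvA p st) :
    InvA (p ++ [x]) (stepA st x) := by
  obtain ⟨hsc, hac, hmax, hub, hcnt⟩ := h
  have hsc' : ∀ l, (st.sc.modify x 0 (· + 1)).getD l 0 = ((p ++ [x]).count l : Int) := by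
    intro l
    rw [PySem.Dict.getD_modify, count_append_single]
    split <;> rename_i hlx <;> simp [hlx, hsc]
  have hget : (st.sc.modify x 0 (· + 1)).getD x 0 = ((p.count x + 1 : Nat) : Int) := by
    rw [hsc' x, count_append_single]; simp
  have hmodc : PySem.Int.mod ((p.count x + 1 : Nat) : Int) 4 = (((p.count x + 1) % 4 : Nat) : Int) := by
    exact_mod_cast PySem.Int.mod_natCast (p.count x + 1) 4
  unfold stepA
  simp only [hget, hmodc]
  by_cases hcond : (p.count x + 1) % 4 = 0
  · have hF : ∀ a, Fcnt (p ++ [x]) a = Fcnt p a + (if a = x * x then 1 else 0) := by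
      intro a
      rw [Fcnt_append]
      by_cases hxa : a = x * x
      · rw [if_pos ⟨hxa.symm, hcond⟩, if_pos hxa]
      · rw [if_neg (fun hc => hxa hc.1.symm), if_neg hxa]
    have hac' : ∀ a, (st.ac.modify (x * x) 0 (· + 1)).getD a 0 = ((Fcnt (p ++ [x]) a : Nat) : Int) := by
      intro a
      rw [PySem.Dict.getD_modify, hF]
      split <;> rename_i hax <;> simp [hax, hac]
    rw [if_pos (by exact_mod_cast hcond)]
    have hFa : Fcnt (p ++ [x]) (x * x) = Fcnt p (x * x) + 1 := by rw [hF]; simp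
    have hFne : ∀ a, a ≠ x * x → Fcnt (p ++ [x]) a = Fcnt p a := fun a ha => by
      rw [hF]; simp [ha]
    have hmax0 : 0 ≤ st.maxA := by rcases hmax with h0 | ⟨hp, _⟩ <;> omega
    by_cases h1 : st.maxA < x * x
    · rw [if_pos h1]
      refine ⟨hsc', hac', Or.inr ⟨?_, ?_⟩, ?_, hac' (x * x)⟩
      · show (0:Int) < x * x
        omega
      · show 1 ≤ Fcnt (p ++ [x]) (x * x)
        rw [hFa]; omega
      · intro a ha hge
        show a ≤ x * x
        by_cases hax : a = x * x
        · omega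
        · have := hub a ha (by rwa [hFne a hax] at hge); omega
    · rw [if_neg h1]
      by_cases h2 : x * x = st.maxA
      · rw [if_pos h2]
        refine ⟨hsc', hac', ?_, ?_, ?_⟩
        · show st.maxA = 0 ∨ 0 < st.maxA ∧ 1 ≤ Fcnt (p ++ [x]) st.maxA
          rcases hmax with h0 | ⟨hp, hf⟩
          · exact Or.inl h0
          · exact Or.inr ⟨hp, by rw [← h2, hFa]; omega⟩
        · intro a ha hge
          show a ≤ st.maxA
          by_cases hax : a = x * x
          · omega
          · exact hub a ha (by rwa [hFne a hax] at hge)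
        · show (st.ac.modify (x * x) 0 (· + 1)).getD (x * x) 0 = (Fcnt (p ++ [x]) st.maxA : Int)
          rw [← h2]; exact hac' (x * x)
      · rw [if_neg h2]
        refine ⟨hsc', hac', ?_, ?_, ?_⟩
        · show st.maxA = 0 ∨ 0 < st.maxA ∧ 1 ≤ Fcnt (p ++ [x]) st.maxA
          rcases hmax with h0 | ⟨hp, hf⟩
          · exact Or.inl h0
          · exact Or.inr ⟨hp, by rwa [hFne st.maxA (fun h => h2 h.symm)]⟩
        · intro a ha hge
          show a ≤ st.maxA
          by_cases hax : a = x * x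
          · omega
          · exact hub a ha (by rwa [hFne a hax] at hge)
        · show st.cnt = (Fcnt (p ++ [x]) st.maxA : Int)
          rw [hFne st.maxA (fun h => h2 h.symm)]; exact hcnt
  · have hF : ∀ a, Fcnt (p ++ [x]) a = Fcnt p a := by
      intro a; rw [Fcnt_append]; simp [hcond]
    rw [if_neg (fun h => hcond (Int.natCast_eq_zero.mp h))]
    exact ⟨hsc', fun a => by rw [hF]; exact hac a, by simpa [hF] using hmax,
      fun a ha h1 => hub a ha (by rwa [hF] at h1), by rw [hF]; exact hcnt⟩


lemma invA_foldl (arr : List Int) :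
    InvA arr (arr.foldl stepA ⟨PySem.Dict.empty, PySem.Dict.empty, 0, 0⟩) := by
  induction arr using List.reverseRecOn with
  | nil =>
    refine ⟨fun l => by simp [PySem.Dict.getD_empty], fun a => by simp [PySem.Dict.getD_empty, Fcnt_nil],
      Or.inl rfl, fun a _ h => by simp [Fcnt_nil] at h, by simp [Fcnt_nil]⟩
  | append_singleton p x ih =>
    rw [List.foldl_append]
    exact invA_step p _ x ih


lemma stepB_getD (d : PySem.Dict Int Int) (q : Int × Int) (a : Int) :
    (stepB d q).getD a 0 = d.getD a 0 + (if q.1 * q.1 = a then PySem.Int.floordiv q.2 4 else 0) := by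
  unfold stepB
  by_cases hk : PySem.Int.floordiv q.2 4 ≠ 0
  · rw [if_pos hk]
    dsimp only
    rw [PySem.Dict.getD_insert]
    split <;> rename_i h
    · rw [if_pos h.symm, h]
    · rw [if_neg (fun hh => h hh.symm)]; omega
  · rw [if_neg hk]
    simp only [ne_eq, not_not] at hk
    rw [hk]; simp

lemma getD_foldB (ps : List (Int × Int)) (d : PySem.Dict Int Int) (a : Int) :
    (ps.foldl stepB d).getD a 0 =
      d.getD a 0 + (ps.map (fun p => if p.1 * p.1 = a then PySem.Int.floordiv p.2 4 else 0)).sum := by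
  induction ps generalizing d with
  | nil => simp
  | cons q t ih =>
    rw [List.foldl_cons, ih, stepB_getD]
    simp [add_assoc]

lemma contains_foldB (ps : List (Int × Int)) (d : PySem.Dict Int Int) (a : Int) :
    (ps.foldl stepB d).contains a = true ↔
      d.contains a = true ∨ ∃ p ∈ ps, p.1 * p.1 = a ∧ PySem.Int.floordiv p.2 4 ≠ 0 := by
  induction ps generalizing d with
  | nil => simp
  | cons q t ih =>
    rw [List.foldl_cons, ih]
    unfold stepB
    by_cases hk : PySem.Int.floordiv q.2 4 ≠ 0
    · rw [if_pos hk]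
      dsimp only
      rw [PySem.Dict.contains_insert]
      constructor
      · rintro (h | h)
        · rcases Bool.or_eq_true _ _ |>.mp h with h' | h'
          · exact Or.inr ⟨q, List.mem_cons_self, by simpa [eq_comm] using (beq_iff_eq.mp h'), hk⟩
          · exact Or.inl h'
        · obtain ⟨p, hp, hpa, hp4⟩ := h
          exact Or.inr ⟨p, List.mem_cons_of_mem _ hp, hpa, hp4⟩
      · rintro (h | ⟨p, hp, hpa, hp4⟩)
        · exact Or.inl (by simp [h])
        · rcases List.mem_cons.mp hp with rfl | hpt
          · exact Or.inl (by simp [hpa])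
          · exact Or.inr ⟨p, hpt, hpa, hp4⟩
    · rw [if_neg hk]
      simp only [ne_eq, not_not] at hk
      constructor
      · rintro (h | h)
        · exact Or.inl h
        · obtain ⟨p, hp, hpa, hp4⟩ := h; exact Or.inr ⟨p, List.mem_cons_of_mem _ hp, hpa, hp4⟩
      · rintro (h | ⟨p, hp, hpa, hp4⟩)
        · exact Or.inl h
        · rcases List.mem_cons.mp hp with rfl | hpt
          · exact absurd hk hp4
          · exact Or.inr ⟨p, hpt, hpa, hp4⟩

lemma floordiv_cast4 (c : Nat) : PySem.Int.floordiv (c : Int) 4 = ((c / 4 : Nat) : Int) := by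
  exact_mod_cast PySem.Int.floordiv_natCast c 4

lemma sum_ite_eq (s xs : List Int) (a : Int) :
    (s.map (fun l => if l * l = a then PySem.Int.floordiv ((xs.count l : Nat) : Int) 4 else 0)).sum
      = ((((s.filter (fun l => decide (l * l = a))).map (fun l => xs.count l / 4)).sum : Nat) : Int) := by
  induction s with
  | nil => simp
  | cons y t ih =>
    rw [List.map_cons, List.sum_cons, ih, List.filter_cons]
    by_cases hy : y * y = a
    · rw [if_pos hy]
      simp only [hy, decide_true, if_true, List.map_cons, List.sum_cons]
      rw [floordiv_cast4]
      push_cast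
      ring
    · rw [if_neg hy]
      simp [hy]

def bFold (arr : List Int) : PySem.Dict Int Int :=
  (PySem.Dict.counter arr).items.foldl stepB PySem.Dict.empty

lemma asq_getD (arr : List Int) (a : Int) :
    (bFold arr).getD a 0 = (Fcnt arr a : Int) := by
  unfold bFold
  rw [getD_foldB, PySem.Dict.getD_empty, PySem.Dict.items_counter, List.map_map]
  simp only [Function.comp_def]
  rw [sum_ite_eq (PySem.Set.ofList arr) arr a]
  rw [zero_add]
  rfl

lemma asq_contains (arr : List Int) (a : Int) :
    (bFold arr).contains a = true ↔ 1 ≤ Fcnt arr a := by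
  unfold bFold
  rw [contains_foldB, PySem.Dict.items_counter, Fcnt_pos_iff]
  simp only [PySem.Dict.contains_empty, Bool.false_eq_true, false_or, List.mem_map]
  constructor
  · rintro ⟨p, ⟨l, hl, rfl⟩, hpa, hp4⟩
    refine ⟨l, (PySem.Set.mem_ofList _ _).mp hl, hpa, ?_⟩
    rw [floordiv_cast4] at hp4
    omega
  · rintro ⟨l, hl, hla, h4⟩
    refine ⟨(l, (arr.count l : Int)), ⟨l, (PySem.Set.mem_ofList _ _).mpr hl, rfl⟩, hla, ?_⟩
    rw [floordiv_cast4]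
    omega

-- ===== VERDICT (by name: the statement is the Claim_ definition above) =====
theorem max_square_area_and_count_spec : Claim_equal_max_square_area_and_count := by
  intro arr n _
  unfold Spec_max_square_area_and_count max_square_area_and_count max_square_area_and_count_alt
  obtain ⟨hsc, hac, hmax, hub, hcnt⟩ := invA_foldl arr
  set st := arr.foldl stepA ⟨PySem.Dict.empty, PySem.Dict.empty, 0, 0⟩ with hst
  show (if st.maxA = 0 then ((-1 : Int), (0 : Int)) else (st.maxA, st.cnt)) =
    (match PySem.List.max? ((bFold arr).keys.filter (fun a => decide (0 < a))) (fun a => a) with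
     | none => ((-1 : Int), (0 : Int))
     | some best => (best, (bFold arr).getD best 0))
  by_cases hm0 : st.maxA = 0
  · have hnil : (bFold arr).keys.filter (fun a => decide (0 < a)) = [] := by
      rw [List.filter_eq_nil_iff]
      intro a hak
      simp only [decide_eq_true_eq]
      intro ha
      have hc : (bFold arr).contains a = true := (PySem.Dict.contains_iff_mem_keys _ _).mpr hak
      have := hub a ha ((asq_contains arr a).mp hc)
      omega
    rw [hnil, if_pos hm0]
    rfl
  · obtain ⟨hpos, hF1⟩ := hmax.resolve_left hm0
    have hmem : st.maxA ∈ (bFold arr).keys.filter (fun a => decide (0 < a)) :=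
      List.mem_filter.mpr ⟨(PySem.Dict.contains_iff_mem_keys _ _).mp
        ((asq_contains arr st.maxA).mpr hF1), by simpa using hpos⟩
    cases hmq : PySem.List.max? ((bFold arr).keys.filter (fun a => decide (0 < a))) (fun a => a) with
    | none =>
      rw [(PySem.List.max?_eq_none_iff _ _).mp hmq] at hmem
      cases hmem
    | some m =>
      have hm_mem := PySem.List.max?_mem hmq
      obtain ⟨hm_keys, hm_pos⟩ := List.mem_filter.mp hm_mem
      have hm_pos' : 0 < m := by simpa using hm_pos
      have h1 : m ≤ st.maxA := hub m hm_pos'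
        ((asq_contains arr m).mp ((PySem.Dict.contains_iff_mem_keys _ _).mpr hm_keys))
      have h2 : st.maxA ≤ m := PySem.List.max?_isMax hmq st.maxA hmem
      have hme : m = st.maxA := le_antisymm h1 h2
      rw [if_neg hm0, hme]
      show (st.maxA, st.cnt) = (st.maxA, (bFold arr).getD st.maxA 0)
      rw [asq_getD arr st.maxA, hcnt]
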